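-- pv_equiv track=rewrite | github.com/roneydua/control_doc | glossaries/updateMathSymbols.py | remover_ensuremath
-- ===== SOURCE A (Python) =====
-- def remover_ensuremath(s):
--     """
--     Remove todas as instâncias de ensuremath{...}, mesmo se estiverem aninhadas.
--     """
--     def encontrar_bloco(texto, inicio):
--         """Retorna índice do fechamento do bloco {...} respeitando aninhamento."""
--         contador = 0
--         for i in range(inicio, len(texto)):
--             if texto[i] == '{':
--                 contador += 1
--             elif texto[i] == '}':
--                 contador -= 1
--                 if contador == 0:
--                     return i
--         return -1
--
--     resultado = ""
--     i = 0
--     while i < len(s):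
--         if s.startswith(r'\ensuremath{', i):
--             i += len(r'\ensuremath{')
--             fim = encontrar_bloco(s, i - 1)
--             if fim == -1:
--                 raise ValueError("Chave não balanceada em \\ensuremath")
--             # Processar conteúdo recursivamente
--             interno = remover_ensuremath(s[i:fim])
--             resultado += interno
--             i = fim + 1
--         else:
--             resultado += s[i]
--             i += 1
--     return resultado
-- ===== SOURCE B (Python) =====
-- def remover_ensuremath(s):
--     """
--     Remove todas as instâncias de ensuremath{...}, mesmo se estiverem aninhadas.
--     Single linear pass: a stack records, for each currently-open '{', whether it
--     was opened by an '\\ensuremath{' (True) or is a plain brace (False).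
--     """
--     out = []
--     stack = []
--     i = 0
--     n = len(s)
--     while i < n:
--         if s.startswith('\\ensuremath{', i):
--             stack.append(True)
--             i += 12
--             continue
--         c = s[i]
--         if c == '{':
--             stack.append(False)
--             out.append(c)
--         elif c == '}':
--             if stack and stack.pop():
--                 pass  # closing brace of an \ensuremath{...}: dropped
--             else:
--                 out.append(c)
--         else:
--             out.append(c)
--         i += 1
--     if any(stack):
--         raise ValueError("Chave não balanceada em \\ensuremath")
--     return ''.join(out)
-- ===== Notes on version B (the rewrite author's own statement) =====
-- stated objective: faster
-- what changed: A rescans every \ensuremath{...} block: it finds the matching brace with a counter scan and then recursively re-processes the block's slice, re-copying text once per nesting level; B makes one linear left-to-right pass keeping a stack of open-brace kinds (ensuremath vs plain), so no slice is ever re-scanned, and like A it raises ValueError when an \ensuremath{ brace is never closed.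
import Mathlib
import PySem

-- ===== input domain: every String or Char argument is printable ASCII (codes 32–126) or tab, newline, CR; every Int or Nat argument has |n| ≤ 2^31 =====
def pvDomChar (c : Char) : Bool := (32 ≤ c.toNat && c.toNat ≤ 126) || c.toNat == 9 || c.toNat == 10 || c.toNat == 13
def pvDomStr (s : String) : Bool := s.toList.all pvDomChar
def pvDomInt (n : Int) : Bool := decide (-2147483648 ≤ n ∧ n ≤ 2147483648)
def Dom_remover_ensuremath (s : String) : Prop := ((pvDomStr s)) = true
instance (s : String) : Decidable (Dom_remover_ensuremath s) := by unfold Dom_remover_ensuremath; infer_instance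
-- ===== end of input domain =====

-- B rewrites A's recursive slice-and-rescan removal as one linear pass with a stack of
-- brace kinds (objective: faster on nested input; A re-scans blocks, B never does).

-- ===== PORT A =====
-- the literal r'\ensuremath{'
def pat : List Char := "\\ensuremath{".toList

-- inner loop of encontrar_bloco (contador, index i over texto); the fuel argument only
-- makes the recursion structural (it is always large enough, see ebAuxF_bounds/L_eb below)
def ebAuxF (texto : List Char) : Nat → Nat → Int → Int
  | 0, _, _ => -1
  | fuel+1, i, contador =>
    if h : i < texto.length then
      if texto[i] = '{' then ebAuxF texto fuel (i + 1) (contador + 1)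
      else if texto[i] = '}' then
        if contador - 1 = 0 then (i : Int)
        else ebAuxF texto fuel (i + 1) (contador - 1)
      else ebAuxF texto fuel (i + 1) contador
    else -1

def encontrarBloco (texto : List Char) (inicio : Nat) : Int :=
  ebAuxF texto (texto.length - inicio) inicio 0

-- while-loop of remover_ensuremath (i, resultado); fuel again only bounds the recursion
-- (s.length + 1 is always enough, see loopAF_eq below)
def loopAF : Nat → List Char → Nat → List Char → List Char
  | 0, _, _, res => res
  | fuel+1, s, i, res =>
    if h : i < s.length then
      if pat.isPrefixOf (s.drop i) then
        let fim := encontrarBloco s (i + 11)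
        if fim = -1 then res  -- Python raises ValueError here; Pre_ excludes these inputs
        else
          let interno := loopAF fuel (PySem.List.slice s (some ((i : Int) + 12)) (some fim)) 0 []
          loopAF fuel s (fim.toNat + 1) (res ++ interno)
      else loopAF fuel s (i + 1) (res ++ [s[i]])
    else res

def removerAF (s : List Char) : List Char := loopAF (s.length + 1) s 0 []

def remover_ensuremath (s : String) : String := String.ofList (removerAF s.toList)

-- ===== PORT B =====
-- single pass; stack : for each open '{', true = opened by '\ensuremath{', false = plain.
-- At the end Source B raises ValueError if any ensuremath marker is left unclosed; the port
-- returns "" there (Pre_ excludes those inputs).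
def loopB : List Char → List Bool → List Char → List Char
  | '\\'::'e'::'n'::'s'::'u'::'r'::'e'::'m'::'a'::'t'::'h'::'{'::rest, st, out => loopB rest (true :: st) out
  | [], st, out => if st.any (· = true) then [] else out.reverse
  | '{' :: rest, st, out => loopB rest (false :: st) ('{' :: out)
  | '}' :: rest, true :: st, out => loopB rest st out
  | '}' :: rest, false :: st, out => loopB rest st ('}' :: out)
  | '}' :: rest, [], out => loopB rest [] ('}' :: out)
  | c :: rest, st, out => loopB rest st (c :: out)

def remover_ensuremath_alt (s : String) : String := String.ofList (loopB s.toList [] [])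

-- ===== PRECONDITION & SPEC =====
-- brace balance: +1 for '{', -1 for '}'
def bstep (c : Char) : Int := if c = '{' then 1 else if c = '}' then -1 else 0
def bsum : List Char → Int
  | [] => 0
  | c :: r => bstep c + bsum r

-- Pre_ excludes exactly the inputs on which A raises ValueError (and B does too): some
-- occurrence of '\ensuremath{' whose '{' is never balanced by a later '}'.
def Pre_remover_ensuremath (s : String) : Prop :=
  ∀ i < s.toList.length, "\\ensuremath{".toList.isPrefixOf (s.toList.drop i) = true →
    ∃ k < s.toList.length + 1, 0 < k ∧ bsum ((s.toList.drop (i + 11)).take k) = 0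
instance (s : String) : Decidable (Pre_remover_ensuremath s) := by
  unfold Pre_remover_ensuremath; infer_instance

def pvWitness_remover_ensuremath : String := "\\ensuremath{x}"

def Spec_remover_ensuremath (s : String) (out : String) : Prop := out = remover_ensuremath_alt s
instance (s : String) (out : String) : Decidable (Spec_remover_ensuremath s out) := by
  unfold Spec_remover_ensuremath; infer_instance

-- ===== CLAIM (what is proved, stated in full; the proofs are below) =====
def Claim_equal_remover_ensuremath : Prop :=
  ∀ (s : String), Dom_remover_ensuremath s → Pre_remover_ensuremath s →
    Spec_remover_ensuremath s (remover_ensuremath s)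

-- ===== LEMMAS AND PROOFS =====

-- bounds of the fuel scan when it does not return -1
theorem ebAuxF_bounds (texto : List Char) : ∀ (fuel i : Nat) (c : Int),
    ebAuxF texto fuel i c ≠ -1 →
    (i : Int) ≤ ebAuxF texto fuel i c ∧ ebAuxF texto fuel i c < (texto.length : Int) := by
  intro fuel
  induction fuel with
  | zero =>
    intro i c hne
    exact absurd rfl hne
  | succ n ih =>
    intro i c hne
    rw [ebAuxF] at hne ⊢
    by_cases h : i < texto.length
    · rw [dif_pos h] at hne ⊢
      by_cases h1 : texto[i] = '{'
      · rw [if_pos h1] at hne ⊢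
        rcases ih (i+1) (c+1) hne with ⟨ha, hb⟩
        exact ⟨by omega, hb⟩
      · rw [if_neg h1] at hne ⊢
        by_cases h2 : texto[i] = '}'
        · rw [if_pos h2] at hne ⊢
          by_cases h3 : c - 1 = 0
          · rw [if_pos h3] at hne ⊢
            exact ⟨le_refl _, by exact_mod_cast h⟩
          · rw [if_neg h3] at hne ⊢
            rcases ih (i+1) (c-1) hne with ⟨ha, hb⟩
            exact ⟨by omega, hb⟩
        · rw [if_neg h2] at hne ⊢
          rcases ih (i+1) c hne with ⟨ha, hb⟩
          exact ⟨by omega, hb⟩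
    · rw [dif_neg h] at hne
      exact absurd rfl hne

theorem encontrarBloco_bounds (texto : List Char) (inicio : Nat) :
    encontrarBloco texto inicio ≠ -1 →
    (inicio : Int) ≤ encontrarBloco texto inicio ∧ encontrarBloco texto inicio < (texto.length : Int) :=
  ebAuxF_bounds texto (texto.length - inicio) inicio 0

-- length of the slice handed to the recursive call
theorem slice_len_le (s : List Char) (i : Nat)
    (hp : pat.isPrefixOf (s.drop i) = true)
    (hf : encontrarBloco s (i + 11) ≠ -1) :
    (PySem.List.slice s (some ((i : Int) + 12)) (some (encontrarBloco s (i + 11)))).length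
      ≤ s.length - (i + 12) := by
  have hb := encontrarBloco_bounds s (i + 11) hf
  have hlen : pat.length ≤ (s.drop i).length := List.IsPrefix.length_le (List.isPrefixOf_iff_prefix.mp hp)
  simp only [List.length_drop] at hlen
  have hcast : ((i : Int) + 12) = ((i + 12 : Nat) : Int) := by push_cast; ring
  rw [hcast]
  have h0 : (0:Int) ≤ encontrarBloco s (i + 11) := by omega
  rcases Int.le.dest h0 with ⟨d, hd⟩
  have hfim : encontrarBloco s (i + 11) = ((d : Nat) : Int) := by omega
  rw [hfim, PySem.List.slice_natCast]
  simp only [List.length_take, List.length_drop]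
  omega

theorem pat_len_le (s : List Char) (i : Nat) (hp : pat.isPrefixOf (s.drop i) = true) :
    i + 12 ≤ s.length := by
  have hlen : pat.length ≤ (s.drop i).length := List.IsPrefix.length_le (List.isPrefixOf_iff_prefix.mp hp)
  simp only [List.length_drop] at hlen
  have : pat.length = 12 := rfl
  omega

-- termination lemmas for the well-founded reference loop, cited in decreasing_by
theorem decA_slice (s : List Char) (i : Nat)
    (hp : pat.isPrefixOf (s.drop i) = true)
    (hf : encontrarBloco s (i + 11) ≠ -1) :
    (PySem.List.slice s (some ((i : Int) + 12)) (some (encontrarBloco s (i + 11)))).length < s.length := by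
  have h1 := slice_len_le s i hp hf
  have h2 := pat_len_le s i hp
  omega

theorem decA_advance (s : List Char) (i : Nat)
    (h : i < s.length)
    (hf : encontrarBloco s (i + 11) ≠ -1) :
    s.length + 1 - ((encontrarBloco s (i + 11)).toNat + 1) < s.length + 1 - i := by
  have hb := encontrarBloco_bounds s (i + 11) hf
  omega

mutual
-- proof-side well-founded version of the port's fuelled loop (loopAF_eq bridges them)
def loopA (s : List Char) (i : Nat) (res : List Char) : List Char :=
  if h : i < s.length then
    if hp : pat.isPrefixOf (s.drop i) then
      let fim := encontrarBloco s (i + 11)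
      if hf : fim = -1 then res
      else
        let interno := removerA (PySem.List.slice s (some ((i : Int) + 12)) (some fim))
        loopA s (fim.toNat + 1) (res ++ interno)
    else loopA s (i + 1) (res ++ [s[i]])
  else res
termination_by (s.length, s.length + 1 - i)
decreasing_by
  · exact Prod.Lex.left _ _ (decA_slice s i hp hf)
  · exact Prod.Lex.right' _ (Nat.le_refl _) (decA_advance s i h hf)
  · exact Prod.Lex.right' _ (Nat.le_refl _) (by omega)

def removerA (s : List Char) : List Char := loopA s 0 []
termination_by (s.length, s.length + 2)
end


-- balanced-block predicate: total brace sum 0, every prefix nonnegative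
def DyckP (u : List Char) : Prop := bsum u = 0 ∧ ∀ k, 0 ≤ bsum (u.take k)

-- unbounded form of Pre_ over lists
def okL (t : List Char) : Prop :=
  ∀ i, pat.isPrefixOf (t.drop i) = true → ∃ k, 0 < k ∧ bsum ((t.drop (i + 11)).take k) = 0

theorem bsum_append (a b : List Char) : bsum (a ++ b) = bsum a + bsum b := by
  induction a with
  | nil => simp [bsum]
  | cons c r ih => simp [bsum, ih]; ring

theorem bsum_take_succ (t : List Char) (i : Nat) (h : i < t.length) :
    bsum (t.take (i + 1)) = bsum (t.take i) + bstep t[i] := by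
  rw [← List.take_concat_get (l := t) (i := i) h, List.concat_eq_append]
  simp only [bsum_append, bsum]
  omega

theorem pat_eq : pat = ['\\','e','n','s','u','r','e','m','a','t','h','{'] := rfl

theorem not_true_to_false {b : Bool} (h : ¬ b = true) : b = false := by
  cases b
  · rfl
  · exact absurd rfl h

theorem prefix_tail {l : List Char} (hp : pat.isPrefixOf l = true) :
    ∃ tl, l = pat ++ tl := by
  rcases List.isPrefixOf_iff_prefix.mp hp with ⟨tl, htl⟩
  exact ⟨tl, htl.symm⟩

-- discrete intermediate value: a positive counter that ends ≤ 0 passes through 0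
theorem L_ivt (w : List Char) : ∀ (c : Int), 0 < c → c + bsum w ≤ 0 →
    ∃ k, k ≤ w.length ∧ c + bsum (w.take k) = 0 := by
  induction w with
  | nil => intro c hc h; simp [bsum] at h; omega
  | cons a r ih =>
    intro c hc h
    simp only [bsum] at h
    by_cases h0 : c + bstep a = 0
    · exact ⟨1, by simp, by simp [bsum, bstep] at h0 ⊢; omega⟩
    · have hstep : -1 ≤ bstep a ∧ bstep a ≤ 1 := by unfold bstep; split_ifs <;> omega
      have hpos : 0 < c + bstep a := by omega
      rcases ih (c + bstep a) hpos (by omega) with ⟨k, hk, hval⟩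
      refine ⟨k + 1, by simpa using hk, ?_⟩
      simp [bsum]
      omega

-- characterisation of the fuelled scan when a closing index exists
theorem L_eb (t : List Char) : ∀ (fuel i : Nat) (c : Int), t.length - i ≤ fuel → 0 < c →
    (∃ k, c + bsum ((t.drop i).take k) = 0) →
    ∃ d : Nat, ebAuxF t fuel i c = ((i + d : Nat) : Int) ∧ i + d < t.length ∧
      t[i + d]? = some '}' ∧
      c + bsum ((t.drop i).take (d + 1)) = 0 ∧
      ∀ k, k ≤ d → 0 < c + bsum ((t.drop i).take k) := by
  intro fuel
  induction fuel with
  | zero =>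
    intro i c hn hc ⟨k, hk⟩
    have hge : t.length ≤ i := by omega
    rw [List.drop_eq_nil_of_le hge] at hk
    simp [bsum] at hk
    omega
  | succ n ih =>
    intro i c hn hc ⟨k, hk⟩
    by_cases h : i < t.length
    · have hdrop : t.drop i = t[i] :: t.drop (i + 1) := List.drop_eq_getElem_cons h
      have hk1 : k ≠ 0 := by rintro rfl; simp [bsum] at hk; omega
      obtain ⟨k', rfl⟩ : ∃ k', k = k' + 1 := ⟨k - 1, by omega⟩
      rw [hdrop] at hk
      simp only [List.take_succ_cons, bsum] at hk
      rw [ebAuxF, dif_pos h]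
      by_cases h1 : t[i] = '{'
      · rw [if_pos h1]
        have hb1 : bstep t[i] = 1 := by simp [bstep, h1]
        rcases ih (i+1) (c+1) (by omega) (by omega) ⟨k', by rw [hb1] at hk; omega⟩
          with ⟨d, he, hlt, hg, hcl, hmin⟩
        refine ⟨d + 1, by rw [he]; congr 1; omega, by omega, by
          have : i + (d+1) = (i+1) + d := by omega
          rw [this]; exact hg, ?_, ?_⟩
        · rw [hdrop]; simp only [List.take_succ_cons, bsum, hb1]; omega
        · intro m hm
          cases m with
          | zero => simp [bsum]; omega
          | succ m' =>
            rw [hdrop]; simp only [List.take_succ_cons, bsum, hb1]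
            have := hmin m' (by omega); omega
      · rw [if_neg h1]
        by_cases h2 : t[i] = '}'
        · rw [if_pos h2]
          have hb1 : bstep t[i] = -1 := by simp [bstep, h2]
          by_cases h3 : c - 1 = 0
          · rw [if_pos h3]
            refine ⟨0, by simp, by omega, ?_, ?_, ?_⟩
            · simp only [Nat.add_zero]
              rw [List.getElem?_eq_getElem h, h2]
            · rw [hdrop]; simp only [List.take_succ_cons, bsum, hb1]
              simp [bsum]; omega
            · intro m hm
              have : m = 0 := by omega
              subst this; simp [bsum]; omega
          · rw [if_neg h3]
            rcases ih (i+1) (c-1) (by omega) (by omega) ⟨k', by rw [hb1] at hk; omega⟩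
              with ⟨d, he, hlt, hg, hcl, hmin⟩
            refine ⟨d + 1, by rw [he]; congr 1; omega, by omega, by
              have : i + (d+1) = (i+1) + d := by omega
              rw [this]; exact hg, ?_, ?_⟩
            · rw [hdrop]; simp only [List.take_succ_cons, bsum, hb1]; omega
            · intro m hm
              cases m with
              | zero => simp [bsum]; omega
              | succ m' =>
                rw [hdrop]; simp only [List.take_succ_cons, bsum, hb1]
                have := hmin m' (by omega); omega
        · rw [if_neg h2]
          have hb1 : bstep t[i] = 0 := by simp [bstep, h1, h2]
          rcases ih (i+1) c (by omega) hc ⟨k', by rw [hb1] at hk; omega⟩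
            with ⟨d, he, hlt, hg, hcl, hmin⟩
          refine ⟨d + 1, by rw [he]; congr 1; omega, by omega, by
            have : i + (d+1) = (i+1) + d := by omega
            rw [this]; exact hg, ?_, ?_⟩
          · rw [hdrop]; simp only [List.take_succ_cons, bsum, hb1]; omega
          · intro m hm
            cases m with
            | zero => simp [bsum]; omega
            | succ m' =>
              rw [hdrop]; simp only [List.take_succ_cons, bsum, hb1]
              have := hmin m' (by omega); omega
    · rw [List.drop_eq_nil_of_le (by omega)] at hk
      simp [bsum] at hk
      omega

-- step lemmas for B's loop
theorem loopB_nil (st : List Bool) (out : List Char) (hst : ∀ b ∈ st, b = false) :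
    loopB [] st out = out.reverse := by
  have hany : st.any (· = true) = false := by
    rw [List.any_eq_false]
    intro b hb
    simp [hst b hb]
  rw [loopB, hany]
  rfl
theorem loopB_pat (rest : List Char) (st : List Bool) (out : List Char) :
    loopB (pat ++ rest) st out = loopB rest (true :: st) out := rfl
theorem loopB_lbrace (rest : List Char) (st : List Bool) (out : List Char) :
    loopB ('{' :: rest) st out = loopB rest (false :: st) ('{' :: out) := rfl
theorem loopB_rbrace_t (rest : List Char) (st : List Bool) (out : List Char) :
    loopB ('}' :: rest) (true :: st) out = loopB rest st out := rfl
theorem loopB_rbrace_f (rest : List Char) (st : List Bool) (out : List Char) :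
    loopB ('}' :: rest) (false :: st) out = loopB rest st ('}' :: out) := rfl
theorem loopB_rbrace_nil (rest : List Char) (out : List Char) :
    loopB ('}' :: rest) [] out = loopB rest [] ('}' :: out) := rfl
theorem loopB_other (c : Char) (rest : List Char) (st : List Bool) (out : List Char)
    (h : pat.isPrefixOf (c :: rest) = false) (h1 : c ≠ '{') (h2 : c ≠ '}') :
    loopB (c :: rest) st out = loopB rest st (c :: out) := by
  rw [loopB.eq_def]
  split <;> simp_all [pat_eq, List.isPrefixOf]

-- step lemmas for A's loop
theorem removerA_eq (s : List Char) : removerA s = loopA s 0 [] := by rw [removerA]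

theorem loopA_end (s : List Char) (i : Nat) (res : List Char) (h : ¬ i < s.length) :
    loopA s i res = res := by rw [loopA, dif_neg h]

theorem loopA_char (s : List Char) (i : Nat) (res : List Char) (h : i < s.length)
    (hp : pat.isPrefixOf (s.drop i) = false) :
    loopA s i res = loopA s (i + 1) (res ++ [s[i]]) := by
  rw [loopA, dif_pos h, dif_neg (by simp [hp])]

theorem loopA_pat (s : List Char) (i : Nat) (res : List Char) (h : i < s.length)
    (hp : pat.isPrefixOf (s.drop i) = true)
    (hf : encontrarBloco s (i + 11) ≠ -1) :
    loopA s i res = loopA s ((encontrarBloco s (i + 11)).toNat + 1)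
      (res ++ removerA (PySem.List.slice s (some ((i : Int) + 12)) (some (encontrarBloco s (i + 11))))) := by
  rw [loopA, dif_pos h, dif_pos (by simp [hp])]
  simp only [dif_neg hf]

theorem loopA_raise (s : List Char) (i : Nat) (res : List Char) (h : i < s.length)
    (hp : pat.isPrefixOf (s.drop i) = true)
    (hf : encontrarBloco s (i + 11) = -1) :
    loopA s i res = res := by
  rw [loopA, dif_pos h, dif_pos (by simp [hp])]
  simp only [dif_pos hf]

-- the port's fuelled loop equals the well-founded reference loop when fuel suffices
theorem loopAF_eq : ∀ (fuel : Nat) (s : List Char) (i : Nat) (res : List Char),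
    s.length - i < fuel → loopAF fuel s i res = loopA s i res := by
  intro fuel
  induction fuel with
  | zero => intro s i res hfu; omega
  | succ n ih =>
    intro s i res hfu
    rw [loopAF]
    by_cases h : i < s.length
    · rw [dif_pos h]
      by_cases hp : pat.isPrefixOf (s.drop i) = true
      · rw [if_pos hp]
        by_cases hf : encontrarBloco s (i + 11) = -1
        · rw [if_pos hf, loopA_raise s i res h hp hf]
        · rw [if_neg hf]
          have h12 := pat_len_le s i hp
          have hsl := slice_len_le s i hp hf
          have hb := encontrarBloco_bounds s (i + 11) hf
          rw [ih _ 0 [] (by omega), ih s ((encontrarBloco s (i + 11)).toNat + 1) _ (by omega)]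
          rw [loopA_pat s i res h hp hf, removerA]
      · rw [if_neg hp, ih s (i + 1) _ (by omega)]
        rw [loopA_char s i res h (not_true_to_false hp)]
    · rw [dif_neg h, loopA_end s i res h]

theorem removerAF_eqW (s : List Char) : removerAF s = removerA s := by
  rw [removerAF, removerA, loopAF_eq (s.length + 1) s 0 [] (by omega)]

-- res accumulates on the left
theorem loopA_acc (s : List Char) : ∀ (n i : Nat), s.length - i ≤ n → ∀ res,
    loopA s i res = res ++ loopA s i [] := by
  intro n
  induction n with
  | zero =>
    intro i hn res
    have h : ¬ i < s.length := by omega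
    rw [loopA_end s i res h, loopA_end s i [] h, List.append_nil]
  | succ n ih =>
    intro i hn res
    by_cases h : i < s.length
    · by_cases hp : pat.isPrefixOf (s.drop i) = true
      · by_cases hf : encontrarBloco s (i + 11) = -1
        · rw [loopA_raise s i res h hp hf, loopA_raise s i [] h hp hf, List.append_nil]
        · have hb := encontrarBloco_bounds s (i + 11) hf
          rw [loopA_pat s i res h hp hf, loopA_pat s i [] h hp hf]
          rw [ih ((encontrarBloco s (i + 11)).toNat + 1) (by omega)
              (res ++ removerA (PySem.List.slice s (some ((i : Int) + 12)) (some (encontrarBloco s (i + 11))))),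
            ih ((encontrarBloco s (i + 11)).toNat + 1) (by omega)
              ([] ++ removerA (PySem.List.slice s (some ((i : Int) + 12)) (some (encontrarBloco s (i + 11)))))]
          simp
      · rw [Bool.not_eq_true] at hp
        rw [loopA_char s i res h hp, loopA_char s i [] h hp]
        rw [ih (i + 1) (by omega) (res ++ [s[i]]), ih (i + 1) (by omega) ([] ++ [s[i]])]
        simp
    · rw [loopA_end s i res h, loopA_end s i [] h, List.append_nil]

-- the pattern cannot straddle the boundary into a '}' (or the end)
theorem pat_prefix_append (v cs : List Char) (hcs : cs = [] ∨ ∃ cs', cs = '}' :: cs') :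
    pat.isPrefixOf (v ++ cs) = pat.isPrefixOf v := by
  rcases hcs with rfl | ⟨cs', rfl⟩
  · simp
  · by_cases hv : pat.isPrefixOf v = true
    · rcases prefix_tail hv with ⟨tl, rfl⟩
      rw [hv, List.isPrefixOf_iff_prefix, List.append_assoc]
      exact (pat.prefix_append _)
    · rw [Bool.not_eq_true] at hv
      rw [hv]
      by_contra hcon
      rw [Bool.not_eq_false, List.isPrefixOf_iff_prefix] at hcon
      by_cases hlen : pat.length ≤ v.length
      · have : pat <+: v :=
          List.prefix_of_prefix_length_le hcon (v.prefix_append _) hlen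
        rw [← List.isPrefixOf_iff_prefix, hv] at this
        exact Bool.false_ne_true this
      · rw [not_le] at hlen
        rcases hcon with ⟨t2, ht2⟩
        have hvlt : v.length < (v ++ '}' :: cs').length := by simp
        have hg : (v ++ '}' :: cs')[v.length]'hvlt = '}' := by
          rw [List.getElem_append_right (le_refl v.length)]
          simp
        have hvp : v.length < pat.length := hlen
        have hg2 : pat[v.length]? = some '}' := by
          rw [← List.getElem?_append_left (l₂ := t2) hvp, ht2,
            List.getElem?_eq_getElem hvlt, hg]
        have hmem : ('}' : Char) ∈ pat := List.mem_of_getElem? hg2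
        simp [pat_eq] at hmem

-- inside a balanced block, every '\ensuremath{' closes
theorem close_in_dyck (u : List Char) (hD : DyckP u) (p : Nat) (tl : List Char)
    (htl : u.drop p = pat ++ tl) : ∃ k, 1 + bsum (tl.take k) = 0 := by
  have hlen : u.length - p = 12 + tl.length := by
    have := congrArg List.length htl
    simp [pat_eq] at this
    omega
  have hd12 : u.drop (p + 12) = tl := by
    rw [← List.drop_drop, htl, List.drop_left' (by simp [pat_eq])]
  have h1 : bsum u = bsum (u.take (p + 12)) + bsum tl := by
    conv_lhs => rw [← List.take_append_drop (p + 12) u]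
    rw [bsum_append, hd12]
  have h2 : bsum (u.take (p + 12)) = bsum (u.take p) + 1 := by
    rw [List.take_add, bsum_append, htl]
    have : (pat ++ tl).take 12 = pat := List.take_left' (by simp [pat_eq])
    rw [this]
    have : bsum pat = 1 := by simp [pat_eq, bsum, bstep]
    omega
  have h3 : 0 ≤ bsum (u.take p) := hD.2 p
  have h4 : 1 + bsum tl ≤ 0 := by
    have := hD.1
    omega
  rcases L_ivt tl 1 one_pos h4 with ⟨k, _, hk⟩
  exact ⟨k, hk⟩

-- what A's encontrar_bloco finds on a pattern occurrence with a closing brace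
theorem L_block (t : List Char) (i : Nat) (tl : List Char)
    (htl : t.drop i = pat ++ tl)
    (hclose : ∃ k, 1 + bsum (tl.take k) = 0) :
    ∃ d : Nat,
      encontrarBloco t (i + 11) = ((i + 12 + d : Nat) : Int) ∧
      i + 12 + d < t.length ∧
      d < tl.length ∧
      PySem.List.slice t (some ((i : Int) + 12)) (some ((i + 12 + d : Nat) : Int)) = tl.take d ∧
      tl.drop d = '}' :: t.drop (i + 12 + d + 1) ∧
      DyckP (tl.take d) ∧
      bsum (t.take (i + 12 + d + 1)) = bsum (t.take i) := by
  have hlen : t.length - i = 12 + tl.length := by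
    have := congrArg List.length htl
    simp [pat_eq] at this
    omega
  have hi : i + 12 ≤ t.length := by omega
  have hd12 : t.drop (i + 12) = tl := by
    rw [← List.drop_drop, htl, List.drop_left' (by simp [pat_eq])]
  have hd11 : t.drop (i + 11) = '{' :: tl := by
    rw [← List.drop_drop, htl, List.drop_append_of_le_length (by simp [pat_eq])]
    rfl
  have h11lt : i + 11 < t.length := by omega
  have hget11 : t[i + 11] = '{' := by
    have hh := List.drop_eq_getElem_cons h11lt
    rw [hd11] at hh
    injection hh with e1 e2
    exact e1.symm
  -- one unfolding of the scan: the first char is the '{'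
  have hm : t.length - (i + 11) = (t.length - (i + 12)) + 1 := by omega
  have hstep : encontrarBloco t (i + 11) = ebAuxF t (t.length - (i + 12)) (i + 12) 1 := by
    unfold encontrarBloco
    rw [hm, ebAuxF, dif_pos h11lt, if_pos hget11]
    norm_num
  rcases hclose with ⟨k, hk⟩
  rcases L_eb t (t.length - (i + 12)) (i + 12) 1 (le_refl _) one_pos ⟨k, by rw [hd12]; exact hk⟩
    with ⟨d, heb, hlt, hgetd, hcl, hmin⟩
  rw [hd12] at hcl hmin
  have hfim : encontrarBloco t (i + 11) = ((i + 12 + d : Nat) : Int) := by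
    rw [hstep, heb]
  have hdlt : d < tl.length := by omega
  have hch : t[i + 12 + d] = '}' := by
    have h2 := hgetd
    rw [List.getElem?_eq_getElem hlt] at h2
    injection h2
  have hdropd : tl.drop d = '}' :: t.drop (i + 12 + d + 1) := by
    have h3 : t.drop (i + 12 + d) = t[i + 12 + d] :: t.drop (i + 12 + d + 1) :=
      List.drop_eq_getElem_cons hlt
    rw [hch] at h3
    rw [← hd12, List.drop_drop]
    exact h3
  have htake_d1 : tl.take (d + 1) = tl.take d ++ ['}'] := by
    rw [List.take_add, hdropd]
    rfl
  have hDu' : DyckP (tl.take d) := by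
    constructor
    · have hcl2 := hcl
      rw [htake_d1, bsum_append] at hcl2
      simp [bsum, bstep] at hcl2
      omega
    · intro k'
      rw [List.take_take]
      by_cases hk' : k' ≤ d
      · have := hmin k' hk'
        rw [min_eq_left hk']
        omega
      · have hcl2 := hcl
        rw [min_eq_right (by omega)]
        rw [htake_d1, bsum_append] at hcl2
        simp [bsum, bstep] at hcl2
        omega
  refine ⟨d, hfim, hlt, hdlt, ?_, hdropd, hDu', ?_⟩
  · have hcast : ((i : Int) + 12) = ((i + 12 : Nat) : Int) := by push_cast; ring
    rw [hcast, PySem.List.slice_natCast, hd12]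
    congr 1
    omega
  · have e1 : i + 12 + d + 1 = i + (12 + (d + 1)) := by omega
    rw [e1, List.take_add, bsum_append, htl]
    have e2 : 12 + (d + 1) = pat.length + (d + 1) := by simp [pat_eq]
    rw [e2, List.take_add, List.take_left' rfl, List.drop_left' rfl, bsum_append]
    have hbp : bsum pat = 1 := by simp [pat_eq, bsum, bstep]
    have hcl2 := hcl
    rw [htake_d1, bsum_append] at hcl2
    simp [bsum, bstep] at hcl2
    omega

-- the master lemma: a balanced block is processed by B's single pass exactly as by
-- A's recursive call, leaving the stack below untouched
theorem ML : ∀ (N : Nat) (u : List Char), u.length ≤ N → DyckP u →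
    ∀ (cs : List Char), (cs = [] ∨ ∃ cs', cs = '}' :: cs') →
    ∀ (st : List Bool) (acc : List Char),
    loopB (u ++ cs) st acc = loopB cs st ((removerA u).reverse ++ acc) := by
  intro N
  induction N with
  | zero =>
    intro u hN _ cs _ st acc
    have hu : u = [] := List.length_eq_zero_iff.mp (by omega)
    subst hu
    rw [removerA_eq, loopA_end _ _ _ (by simp)]
    simp
  | succ N ihN =>
    intro u hN hD cs hcs st acc
    have IL : ∀ (m : Nat), ∀ (i : Nat), u.length - i ≤ m → i ≤ u.length →
        ∀ (ms : List Bool), (ms.length : Int) = bsum (u.take i) → (∀ b ∈ ms, b = false) →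
        ∀ (acc' : List Char),
        loopB (u.drop i ++ cs) (ms ++ st) acc' = loopB cs st ((loopA u i []).reverse ++ acc') := by
      intro m
      induction m with
      | zero =>
        intro i h0 hi ms hms hmsf acc'
        have hieq : i = u.length := by omega
        subst hieq
        rw [List.drop_length, List.take_length, hD.1] at *
        have hms0 : ms = [] := List.length_eq_zero_iff.mp (by omega)
        subst hms0
        rw [loopA_end _ _ _ (by omega)]
        simp
      | succ m ihm =>
        intro i hm hi ms hms hmsf acc'
        by_cases hil : i < u.length
        · by_cases hp : pat.isPrefixOf (u.drop i) = true
          · rcases prefix_tail hp with ⟨tl, htl⟩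
            have hlen12 : u.length - i = 12 + tl.length := by
              have := congrArg List.length htl
              simp [pat_eq] at this
              omega
            rcases L_block u i tl htl (close_in_dyck u hD i tl htl) with
              ⟨d, hfim, hlt, hdlt, hslice, hdropd, hDu', hbsum⟩
            have hfne : encontrarBloco u (i + 11) ≠ -1 := by rw [hfim]; omega
            have hA : loopA u i [] = removerA (tl.take d) ++ loopA u (i + 12 + d + 1) [] := by
              rw [loopA_pat u i [] hil hp hfne, hfim, Int.toNat_natCast, hslice]
              rw [loopA_acc u u.length (i + 12 + d + 1) (by omega) ([] ++ removerA (tl.take d))]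
              simp
            rw [htl, List.append_assoc, loopB_pat]
            have htlsplit : tl ++ cs = tl.take d ++ ('}' :: (u.drop (i + 12 + d + 1) ++ cs)) := by
              conv_lhs => rw [← List.take_append_drop d tl]
              rw [List.append_assoc, hdropd]
              rfl
            rw [htlsplit]
            have hlenu' : (tl.take d).length ≤ N := by
              simp only [List.length_take]
              omega
            rw [ihN (tl.take d) hlenu' hDu' _ (Or.inr ⟨_, rfl⟩) (true :: (ms ++ st)) acc']
            rw [loopB_rbrace_t]
            rw [ihm (i + 12 + d + 1) (by omega) (by omega) ms (by rw [hbsum]; exact hms) hmsf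
              ((removerA (tl.take d)).reverse ++ acc')]
            rw [hA]
            simp [List.reverse_append, List.append_assoc]
          · have hpf : pat.isPrefixOf (u.drop i) = false := not_true_to_false hp
            have hdropc : u.drop i = u[i] :: u.drop (i + 1) := List.drop_eq_getElem_cons hil
            have hbfalse : pat.isPrefixOf (u[i] :: (u.drop (i + 1) ++ cs)) = false := by
              rw [← List.cons_append, ← hdropc, pat_prefix_append _ _ hcs]
              exact hpf
            have hA : loopA u i [] = u[i] :: loopA u (i + 1) [] := by
              rw [loopA_char u i [] hil hpf]
              rw [loopA_acc u u.length (i + 1) (by omega) ([] ++ [u[i]])]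
              simp
            rw [hdropc, List.cons_append]
            have hstep1 : bsum (u.take (i + 1)) = bsum (u.take i) + bstep u[i] :=
              bsum_take_succ u i hil
            by_cases hc1 : u[i] = '{'
            · rw [hc1, loopB_lbrace]
              rw [show (false :: (ms ++ st)) = (false :: ms) ++ st from rfl]
              rw [ihm (i + 1) (by omega) (by omega) (false :: ms)
                (by simp only [List.length_cons]; rw [hstep1, hc1]; simp [bstep]; push_cast; omega)
                (by intro b hb; rcases List.mem_cons.mp hb with rfl | hb2; exacts [rfl, hmsf b hb2])
                ('{' :: acc')]
              rw [hA, hc1]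
              simp [List.reverse_cons, List.append_assoc]
            · by_cases hc2 : u[i] = '}'
              · have hpos : 0 ≤ bsum (u.take (i + 1)) := hD.2 (i + 1)
                cases ms with
                | nil =>
                  exfalso
                  simp at hms
                  rw [hstep1, hc2] at hpos
                  simp [bstep] at hpos
                  omega
                | cons b ms' =>
                  have hb : b = false := hmsf b (by simp)
                  subst hb
                  rw [hc2]
                  rw [show ((false :: ms') ++ st) = false :: (ms' ++ st) from rfl]
                  rw [loopB_rbrace_f]
                  rw [ihm (i + 1) (by omega) (by omega) ms'
                    (by rw [hstep1, hc2]; simp only [List.length_cons] at hms; simp [bstep]; push_cast at hms ⊢; omega)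
                    (by intro b hb; exact hmsf b (by simp [hb]))
                    ('}' :: acc')]
                  rw [hA, hc2]
                  simp [List.reverse_cons, List.append_assoc]
              · rw [loopB_other u[i] _ (ms ++ st) acc' hbfalse hc1 hc2]
                rw [ihm (i + 1) (by omega) (by omega) ms
                  (by rw [hstep1]; simp [bstep, hc1, hc2]; exact_mod_cast hms) hmsf
                  (u[i] :: acc')]
                rw [hA]
                simp [List.reverse_cons, List.append_assoc]
        · have hieq : i = u.length := by omega
          subst hieq
          rw [List.drop_length, List.take_length, hD.1] at *
          have hms0 : ms = [] := List.length_eq_zero_iff.mp (by omega)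
          subst hms0
          rw [loopA_end _ _ _ (by omega)]
          simp
    have := IL u.length 0 (by omega) (by omega) [] (by simp [bsum]) (by simp) acc
    simpa [removerA_eq] using this

-- top-level scan: B with an all-plain stack equals A
theorem LTop (s : List Char) (hok : okL s) : ∀ (m i : Nat), s.length - i ≤ m →
    ∀ (st : List Bool), (∀ b ∈ st, b = false) → ∀ (acc : List Char),
    loopB (s.drop i) st acc = acc.reverse ++ loopA s i [] := by
  intro m
  induction m with
  | zero =>
    intro i h0 st hstf acc
    rw [List.drop_eq_nil_of_le (by omega), loopB_nil st acc hstf, loopA_end _ _ _ (by omega)]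
    simp
  | succ m ihm =>
    intro i hm st hstf acc
    by_cases hil : i < s.length
    · by_cases hp : pat.isPrefixOf (s.drop i) = true
      · rcases prefix_tail hp with ⟨tl, htl⟩
        have hclose : ∃ k, 1 + bsum (tl.take k) = 0 := by
          rcases hok i hp with ⟨k, hk0, hkv⟩
          have hd11 : s.drop (i + 11) = '{' :: tl := by
            rw [← List.drop_drop, htl, List.drop_append_of_le_length (by simp [pat_eq])]
            rfl
          obtain ⟨k', rfl⟩ : ∃ k', k = k' + 1 := ⟨k - 1, by omega⟩
          rw [hd11] at hkv
          simp only [List.take_succ_cons, bsum] at hkv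
          refine ⟨k', ?_⟩
          simp [bstep] at hkv
          omega
        rcases L_block s i tl htl hclose with ⟨d, hfim, hlt, hdlt, hslice, hdropd, hDu', hbsum⟩
        have hfne : encontrarBloco s (i + 11) ≠ -1 := by rw [hfim]; omega
        have hA : loopA s i [] = removerA (tl.take d) ++ loopA s (i + 12 + d + 1) [] := by
          rw [loopA_pat s i [] hil hp hfne, hfim, Int.toNat_natCast, hslice]
          rw [loopA_acc s s.length (i + 12 + d + 1) (by omega) ([] ++ removerA (tl.take d))]
          simp
        rw [htl, loopB_pat]
        have htlsplit : tl = tl.take d ++ ('}' :: s.drop (i + 12 + d + 1)) := by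
          conv_lhs => rw [← List.take_append_drop d tl]
          rw [hdropd]
        rw [htlsplit]
        rw [ML (tl.take d).length (tl.take d) le_rfl hDu' ('}' :: s.drop (i + 12 + d + 1))
          (Or.inr ⟨_, rfl⟩) (true :: st) acc]
        rw [loopB_rbrace_t]
        rw [ihm (i + 12 + d + 1) (by omega) st hstf ((removerA (tl.take d)).reverse ++ acc)]
        rw [hA]
        simp [List.reverse_append, List.append_assoc]
      · have hpf : pat.isPrefixOf (s.drop i) = false := not_true_to_false hp
        have hdropc : s.drop i = s[i] :: s.drop (i + 1) := List.drop_eq_getElem_cons hil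
        have hbfalse : pat.isPrefixOf (s[i] :: s.drop (i + 1)) = false := by
          rw [← hdropc]
          exact hpf
        have hA : loopA s i [] = s[i] :: loopA s (i + 1) [] := by
          rw [loopA_char s i [] hil hpf]
          rw [loopA_acc s s.length (i + 1) (by omega) ([] ++ [s[i]])]
          simp
        rw [hdropc]
        by_cases hc1 : s[i] = '{'
        · rw [hc1, loopB_lbrace]
          rw [ihm (i + 1) (by omega) (false :: st)
            (by intro b hb; rcases List.mem_cons.mp hb with rfl | hb2; exacts [rfl, hstf b hb2])
            ('{' :: acc)]
          rw [hA, hc1]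
          simp
        · by_cases hc2 : s[i] = '}'
          · cases st with
            | nil =>
              rw [hc2, loopB_rbrace_nil]
              rw [ihm (i + 1) (by omega) [] (by simp) ('}' :: acc)]
              rw [hA, hc2]
              simp
            | cons b st' =>
              have hb : b = false := hstf b (by simp)
              subst hb
              rw [hc2, loopB_rbrace_f]
              rw [ihm (i + 1) (by omega) st' (fun b hb => hstf b (by simp [hb])) ('}' :: acc)]
              rw [hA, hc2]
              simp
          · rw [loopB_other s[i] _ st acc hbfalse hc1 hc2]
            rw [ihm (i + 1) (by omega) st hstf (s[i] :: acc)]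
            rw [hA]
            simp
    · rw [List.drop_eq_nil_of_le (by omega), loopB_nil st acc hstf, loopA_end _ _ _ (by omega)]
      simp

-- ===== VERDICT (by name: the statement is the Claim_ definition above) =====
theorem remover_ensuremath_spec : Claim_equal_remover_ensuremath := by
  intro s hdom hpre
  unfold Spec_remover_ensuremath remover_ensuremath remover_ensuremath_alt
  have hok : okL s.toList := by
    intro i hp
    by_cases hi : i < s.toList.length
    · rcases hpre i hi hp with ⟨k, hk, hk0, hkv⟩
      exact ⟨k, hk0, hkv⟩
    · exfalso
      rw [List.drop_eq_nil_of_le (by omega)] at hp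
      simp [pat_eq, List.isPrefixOf] at hp
  have h := LTop s.toList hok s.toList.length 0 (by omega) [] (by simp) []
  simp only [List.drop_zero, List.reverse_nil, List.nil_append] at h
  rw [removerAF_eqW, removerA_eq, h]
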